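-- pv_equiv track=rewrite | github.com/ytworks/Xray_Chest | make_mini_batch.py | diagnosis_map
-- ===== SOURCE A (Python) =====
-- def diagnosis_map(diags, labels):
--     mapper = {}
--     for d in diags:
--         mapper.setdefault(d, [])
--         for i, l in enumerate(labels):
--             if l in ['Mass', 'Nodule']:
--                 mapper[d].append(i)
--             if d.find('pneumonia') >= 0 and l == 'Pneumonia':
--                 mapper[d].append(i)
--     return mapper
-- ===== SOURCE B (Python) =====
-- def diagnosis_map(diags, labels):
--     # Precompute the matching label indices once: O(D + L + output) instead of A's O(D * L).
--     base = [i for i, l in enumerate(labels) if l in ('Mass', 'Nodule')]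
--     with_pneu = [i for i, l in enumerate(labels)
--                  if l in ('Mass', 'Nodule') or l == 'Pneumonia']
--     mapper = {}
--     for d in diags:
--         mapper.setdefault(d, []).extend(with_pneu if 'pneumonia' in d else base)
--     return mapper
-- ===== Notes on version B (the rewrite author's own statement) =====
-- stated objective: faster
-- what changed: B precomputes the Mass/Nodule index list and the with-Pneumonia index list once and extends each diag's entry with the appropriate precomputed list, instead of rescanning all labels for every diag.
import Mathlib
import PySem

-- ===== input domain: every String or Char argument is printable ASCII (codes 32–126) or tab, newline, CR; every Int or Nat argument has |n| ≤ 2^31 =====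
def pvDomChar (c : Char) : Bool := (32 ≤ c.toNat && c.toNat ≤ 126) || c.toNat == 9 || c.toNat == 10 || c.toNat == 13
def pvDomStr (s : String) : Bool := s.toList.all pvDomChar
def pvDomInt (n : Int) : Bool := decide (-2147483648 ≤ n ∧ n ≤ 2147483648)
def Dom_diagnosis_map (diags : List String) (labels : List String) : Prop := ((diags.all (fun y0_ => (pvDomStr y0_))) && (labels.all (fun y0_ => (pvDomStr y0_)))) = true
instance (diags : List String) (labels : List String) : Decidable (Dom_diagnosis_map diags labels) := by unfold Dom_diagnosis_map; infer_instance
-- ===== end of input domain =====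

-- B precomputes the two matching-index lists once and extends each diag's entry with the right one,
-- instead of A's rescan of all labels for every diag (objective: faster, asymptotically).

-- ===== PORT A =====
-- A's inner loop body over enumerate(labels): the two sequential ifs, appends to mapper[d]
def pvStepA (d : String) (m : PySem.Dict String (List Int)) (il : Int × String) : PySem.Dict String (List Int) :=
  let m1 := if il.2 = "Mass" ∨ il.2 = "Nodule" then m.modify d [] (fun v => v ++ [il.1]) else m
  if PySem.Str.find d "pneumonia" ≥ 0 ∧ il.2 = "Pneumonia" then m1.modify d [] (fun v => v ++ [il.1]) else m1

def diagnosis_map (diags : List String) (labels : List String) : List (String × List Int) :=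
  (diags.foldl
    (fun mapper d =>
      (PySem.List.enumerate labels 0).foldl (pvStepA d) (mapper.setdefault d []))
    PySem.Dict.empty).items

-- ===== PORT B =====
def diagnosis_map_alt (diags : List String) (labels : List String) : List (String × List Int) :=
  let base := (PySem.List.enumerate labels 0).filterMap
    (fun il => if il.2 = "Mass" ∨ il.2 = "Nodule" then some il.1 else none)
  let withPneu := (PySem.List.enumerate labels 0).filterMap
    (fun il => if il.2 = "Mass" ∨ il.2 = "Nodule" ∨ il.2 = "Pneumonia" then some il.1 else none)
  (diags.foldl
    (fun mapper d =>
      (mapper.setdefault d []).modify d []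
        (fun v => v ++ (if PySem.Str.isIn "pneumonia" d then withPneu else base)))
    PySem.Dict.empty).items

-- ===== PRECONDITION & SPEC =====
def Spec_diagnosis_map (diags : List String) (labels : List String) (out : List (String × List Int)) : Prop := out = diagnosis_map_alt diags labels
instance (diags : List String) (labels : List String) (out : List (String × List Int)) : Decidable (Spec_diagnosis_map diags labels out) := by unfold Spec_diagnosis_map; infer_instance

-- ===== CLAIM (what is proved, stated in full; the proofs are below) =====
def Claim_equal_diagnosis_map : Prop := ∀ (diags : List String) (labels : List String), Dom_diagnosis_map diags labels → Spec_diagnosis_map diags labels (diagnosis_map diags labels)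

-- ===== LEMMAS AND PROOFS =====

-- what A's inner loop appends to mapper[d] for one label l at index s
def pvSeg (pneu : Bool) (s : Int) (l : String) : List Int :=
  (if l = "Mass" ∨ l = "Nodule" then [s] else []) ++
  (if pneu ∧ l = "Pneumonia" then [s] else [])

-- what A's inner loop appends over a whole label list starting at index s
def pvSegs (pneu : Bool) : List String → Int → List Int
  | [], _ => []
  | l :: ls, s => pvSeg pneu s l ++ pvSegs pneu ls (s + 1)

theorem pv_modify_modify (m : PySem.Dict String (List Int)) (k : String) (dflt : List Int)
    (f g : List Int → List Int) :
    (m.modify k dflt f).modify k dflt g = m.modify k dflt (fun v => g (f v)) := by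
  simp [PySem.Dict.modify, PySem.Dict.getD_insert_self, PySem.Dict.insert_insert_self]

theorem pv_modify_id (m : PySem.Dict String (List Int)) (k : String) (dflt : List Int)
    (hnd : m.keys.Nodup) (hc : m.contains k = true) :
    m.modify k dflt (fun v => v) = m := by
  apply PySem.Dict.ext
  show (m.insert k (m.getD k dflt)).items = m.items
  rw [PySem.Dict.items_insert_of_contains m (m.getD k dflt) hc]
  have hmap : ∀ p ∈ m.items, (if (p.1 == k) = true then (k, m.getD k dflt) else p) = id p := by
    intro p hp
    by_cases hpk : (p.1 == k) = true
    · have h1 : p.1 = k := eq_of_beq hpk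
      have hmem : (k, p.2) ∈ m.items := by rw [← h1]; exact hp
      have h2 : m.getD k dflt = p.2 := PySem.Dict.getD_of_mem_items m hmem hnd dflt
      rw [if_pos hpk, h2, ← h1]
      simp
    · simp [hpk]
  rw [List.map_congr_left hmap, List.map_id]

theorem pv_stepA_eq (d : String) (m : PySem.Dict String (List Int)) (f : List Int → List Int)
    (s : Int) (l : String) :
    pvStepA d (m.modify d [] f) (s, l) =
      m.modify d [] (fun v => f v ++ pvSeg (decide (PySem.Str.find d "pneumonia" ≥ 0)) s l) := by
  simp only [pvStepA, pvSeg]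
  by_cases h1 : l = "Mass" ∨ l = "Nodule"
  · have h3 : l ≠ "Pneumonia" := by rcases h1 with h | h <;> subst h <;> decide
    have h2 : ¬(PySem.Str.find d "pneumonia" ≥ 0 ∧ l = "Pneumonia") := fun h => h3 h.2
    have h2' : ¬((decide (PySem.Str.find d "pneumonia" ≥ 0) = true) ∧ l = "Pneumonia") :=
      fun h => h3 h.2
    rw [if_pos h1, if_pos h1, if_neg h2, if_neg h2', pv_modify_modify]
    simp
  · rw [if_neg h1, if_neg h1]
    by_cases h2 : PySem.Str.find d "pneumonia" ≥ 0 ∧ l = "Pneumonia"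
    · have h2' : (decide (PySem.Str.find d "pneumonia" ≥ 0) = true) ∧ l = "Pneumonia" :=
        ⟨decide_eq_true h2.1, h2.2⟩
      rw [if_pos h2, if_pos h2', pv_modify_modify]
      simp
    · have h2' : ¬((decide (PySem.Str.find d "pneumonia" ≥ 0) = true) ∧ l = "Pneumonia") := by
        intro h; exact h2 ⟨of_decide_eq_true h.1, h.2⟩
      rw [if_neg h2, if_neg h2']
      simp

theorem pv_inner (d : String) (ls : List String) (s : Int) (m : PySem.Dict String (List Int))
    (f : List Int → List Int) :
    (PySem.List.enumerate ls s).foldl (pvStepA d) (m.modify d [] f) =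
      m.modify d [] (fun v => f v ++ pvSegs (decide (PySem.Str.find d "pneumonia" ≥ 0)) ls s) := by
  induction ls generalizing s f with
  | nil => simp [PySem.List.enumerate_nil, pvSegs]
  | cons l ls ih =>
    rw [PySem.List.enumerate_cons, List.foldl_cons, pv_stepA_eq, ih]
    congr 1
    funext v
    simp [pvSegs, List.append_assoc]

theorem pv_segs_true (ls : List String) (s : Int) :
    pvSegs true ls s = (PySem.List.enumerate ls s).filterMap
      (fun il => if il.2 = "Mass" ∨ il.2 = "Nodule" ∨ il.2 = "Pneumonia" then some il.1 else none) := by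
  induction ls generalizing s with
  | nil => simp [PySem.List.enumerate_nil, pvSegs]
  | cons l ls ih =>
    rw [PySem.List.enumerate_cons, List.filterMap_cons]
    by_cases hm : l = "Mass" ∨ l = "Nodule"
    · have hp : l ≠ "Pneumonia" := by rcases hm with h | h <;> subst h <;> decide
      simp [pvSegs, pvSeg, hm, hp, ih]
    · by_cases hp : l = "Pneumonia" <;> simp [pvSegs, pvSeg, hm, hp, ih]

theorem pv_segs_false (ls : List String) (s : Int) :
    pvSegs false ls s = (PySem.List.enumerate ls s).filterMap
      (fun il => if il.2 = "Mass" ∨ il.2 = "Nodule" then some il.1 else none) := by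
  induction ls generalizing s with
  | nil => simp [PySem.List.enumerate_nil, pvSegs]
  | cons l ls ih =>
    rw [PySem.List.enumerate_cons, List.filterMap_cons]
    by_cases hm : l = "Mass" ∨ l = "Nodule" <;> simp [pvSegs, pvSeg, hm, ih]

theorem pv_nodup_setdefault (m : PySem.Dict String (List Int)) (k : String) (v : List Int)
    (hnd : m.keys.Nodup) : (m.setdefault k v).keys.Nodup := by
  by_cases hc : m.contains k = true
  · rw [PySem.Dict.setdefault_of_contains m v hc]; exact hnd
  · rw [PySem.Dict.setdefault_of_not_contains m v (by simpa using hc)]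
    exact PySem.Dict.nodup_keys_insert m k v hnd

theorem pv_step_eq (labels : List String) (m : PySem.Dict String (List Int)) (d : String)
    (hnd : m.keys.Nodup) :
    (PySem.List.enumerate labels 0).foldl (pvStepA d) (m.setdefault d []) =
      (m.setdefault d []).modify d []
        (fun v => v ++ (if PySem.Str.isIn "pneumonia" d then
          (PySem.List.enumerate labels 0).filterMap
            (fun il => if il.2 = "Mass" ∨ il.2 = "Nodule" ∨ il.2 = "Pneumonia" then some il.1 else none)
        else
          (PySem.List.enumerate labels 0).filterMap
            (fun il => if il.2 = "Mass" ∨ il.2 = "Nodule" then some il.1 else none))) := by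
  have hc : (m.setdefault d []).contains d = true := by
    rw [PySem.Dict.contains_setdefault]; simp
  have hnd' : (m.setdefault d []).keys.Nodup := pv_nodup_setdefault m d [] hnd
  conv_lhs => rw [← pv_modify_id (m.setdefault d []) d [] hnd' hc]
  rw [pv_inner]
  congr 1
  funext v
  by_cases hpn : PySem.Str.find d "pneumonia" ≥ 0
  · have hin : PySem.Str.isIn "pneumonia" d = true :=
      (PySem.Str.isIn_iff_infix _ _).mpr ((PySem.Str.find_nonneg_iff _ _).mp hpn)
    rw [decide_eq_true hpn, pv_segs_true, if_pos hin]
  · have hin : ¬ (PySem.Str.isIn "pneumonia" d = true) := by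
      rw [PySem.Str.isIn_iff_infix]
      exact fun h => hpn ((PySem.Str.find_nonneg_iff _ _).mpr h)
    rw [decide_eq_false hpn, pv_segs_false, if_neg hin]

theorem pv_fold_eq (labels : List String) (diags : List String)
    (m : PySem.Dict String (List Int)) (hnd : m.keys.Nodup) :
    diags.foldl
      (fun mapper d => (PySem.List.enumerate labels 0).foldl (pvStepA d) (mapper.setdefault d [])) m =
    diags.foldl
      (fun mapper d => (mapper.setdefault d []).modify d []
        (fun v => v ++ (if PySem.Str.isIn "pneumonia" d then
          (PySem.List.enumerate labels 0).filterMap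
            (fun il => if il.2 = "Mass" ∨ il.2 = "Nodule" ∨ il.2 = "Pneumonia" then some il.1 else none)
        else
          (PySem.List.enumerate labels 0).filterMap
            (fun il => if il.2 = "Mass" ∨ il.2 = "Nodule" then some il.1 else none)))) m := by
  induction diags generalizing m with
  | nil => rfl
  | cons d ds ih =>
    rw [List.foldl_cons, List.foldl_cons, pv_step_eq labels m d hnd]
    exact ih _ (PySem.Dict.nodup_keys_insert _ _ _ (pv_nodup_setdefault m d [] hnd))

-- ===== VERDICT (by name: the statement is the Claim_ definition above) =====
theorem diagnosis_map_spec : Claim_equal_diagnosis_map := by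
  intro diags labels _
  unfold Spec_diagnosis_map
  simp only [diagnosis_map, diagnosis_map_alt]
  rw [pv_fold_eq labels diags PySem.Dict.empty (by rw [PySem.Dict.keys_empty]; exact List.nodup_nil)]
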